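-- pv_equiv track=rewrite | github.com/TylerMorley/advent-of-code | 2024/day02/day02.py | countSafeReports
-- ===== SOURCE A (Python) =====
-- def compareLevels(levels):
--     cur, nxt = levels
--     difference = cur - nxt
--
--     direction = ''
--     if difference > 0:
--         direction = 'decreasing'
--     elif difference < 0:
--         direction = 'increasing'
--     else:
--         direction = 'flat'
--
--     gradation = abs(difference)
--
--     return [direction, gradation]
--
-- def checkReportSafety(report):
--     direction = None
--
--     for i in range(len(report)-1):
--         cur_direction, gradation = compareLevels([report[i], report[i+1]])
--
--         if direction == None:
--             direction = cur_direction
--         elif direction != cur_direction: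
--             return [False, i]
--         if gradation > 3 or gradation < 1:
--             return [False, i]
--
--     return [True, None]
--
-- def countSafeReports(reports, is_dampened=False):
--     count = 0
--     for report in reports:
--         report_is_safe, i = checkReportSafety(report)
--         if report_is_safe:
--             count += 1
--         elif is_dampened:
--             if checkDampenedSafety(report, i) == True:
--                 count += 1
--     return count
--
-- def checkDampenedSafety(report, i):
--     indices = [i, i+1]
--     if i > 0:
--         indices.append(i-1)
--     reports = []
--
--     for j in indices:
--         new_report = report.copy()
--         new_report.pop(j)
--         reports.append(new_report)
--
--     dampened_safety = False
--     for rep in reports: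
--         is_safe, k = checkReportSafety(rep)
--         if is_safe:
--             dampened_safety = True
--
--     return dampened_safety
-- ===== SOURCE B (Python) =====
-- def _safe(r):
--     diffs = [b - a for a, b in zip(r, r[1:])]
--     return all(1 <= d <= 3 for d in diffs) or all(-3 <= d <= -1 for d in diffs)
--
-- def countSafeReports(reports, is_dampened=False):
--     count = 0
--     for r in reports:
--         if _safe(r):
--             count += 1
--         elif is_dampened and any(_safe(r[:j] + r[j+1:]) for j in range(len(r))):
--             count += 1
--     return count
-- ===== Notes on version B (the rewrite author's own statement) =====
-- stated objective: simpler
-- what changed: Replaced A's stateful direction-tracking scan that returns the first failure index plus a 3-neighbor removal probe by a direct pairwise-difference predicate (all diffs in 1..3 or all in -3..-1) and, for dampening, a brute-force check of every single-element removal built by slicing.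
import Mathlib
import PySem

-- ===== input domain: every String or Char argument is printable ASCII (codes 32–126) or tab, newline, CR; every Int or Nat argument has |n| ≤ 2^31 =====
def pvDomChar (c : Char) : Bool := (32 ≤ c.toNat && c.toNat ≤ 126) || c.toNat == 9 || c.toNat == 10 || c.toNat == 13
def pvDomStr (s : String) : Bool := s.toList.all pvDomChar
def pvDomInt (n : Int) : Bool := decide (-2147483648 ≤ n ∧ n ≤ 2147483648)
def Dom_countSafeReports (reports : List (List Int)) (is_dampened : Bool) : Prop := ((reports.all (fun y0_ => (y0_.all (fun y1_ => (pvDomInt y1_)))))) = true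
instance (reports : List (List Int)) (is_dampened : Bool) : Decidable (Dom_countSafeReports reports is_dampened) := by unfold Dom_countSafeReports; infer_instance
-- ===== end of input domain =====

-- B replaces A's first-failure-index scan plus 3-neighbor removal probe by a plain
-- pairwise-difference predicate and a brute-force check of every single-element removal (simpler).

-- ===== PORT A =====
def compareLevels (cur nxt : Int) : String × Int :=
  let difference := cur - nxt
  let direction :=
    if difference > 0 then "decreasing"
    else if difference < 0 then "increasing"
    else "flat"
  (direction, |difference|)

-- the for-loop of checkReportSafety, i running over range(len(report)-1), with early returns
def crsLoop (report : List Int) (direction : Option String) (i : Nat) : Bool × Option Nat :=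
  if _h : i + 1 < report.length then
    let c := compareLevels (report.getD i 0) (report.getD (i+1) 0)
    match direction with
    | none =>
      if c.2 > 3 || c.2 < 1 then (false, some i)
      else crsLoop report (some c.1) (i+1)
    | some d =>
      if d ≠ c.1 then (false, some i)
      else if c.2 > 3 || c.2 < 1 then (false, some i)
      else crsLoop report (some d) (i+1)
  else (true, none)
termination_by report.length - i

def checkReportSafety (report : List Int) : Bool × Option Nat := crsLoop report none 0

def checkDampenedSafety (report : List Int) (i : Nat) : Bool :=
  let indices := [i, i+1] ++ (if i > 0 then [i-1] else [])
  let reps := indices.map (fun j => report.eraseIdx j)   -- report.copy(); .pop(j)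
  reps.foldl (fun acc rep => if (checkReportSafety rep).1 then true else acc) false

def countSafeReports (reports : List (List Int)) (is_dampened : Bool) : Int :=
  reports.foldl (fun count report =>
    let res := checkReportSafety report
    if res.1 then count + 1
    else if is_dampened then
      -- Python unpacks `i`; it is only read when res.1 = false, where res.2 = some i
      if checkDampenedSafety report (res.2.getD 0) then count + 1 else count
    else count) 0

-- ===== PORT B =====
def diffsOf (r : List Int) : List Int := (r.zip r.tail).map (fun p => p.2 - p.1)

def safeReport (r : List Int) : Bool :=
  (diffsOf r).all (fun d => 1 ≤ d && d ≤ 3) || (diffsOf r).all (fun d => -3 ≤ d && d ≤ -1)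

def countSafeReports_alt (reports : List (List Int)) (is_dampened : Bool) : Int :=
  reports.foldl (fun count r =>
    if safeReport r then count + 1
    else if is_dampened && (List.range r.length).any (fun j => safeReport (r.take j ++ r.drop (j+1))) then count + 1
    else count) 0

-- ===== PRECONDITION & SPEC =====
def Spec_countSafeReports (reports : List (List Int)) (is_dampened : Bool) (out : Int) : Prop := out = countSafeReports_alt reports is_dampened
instance (reports : List (List Int)) (is_dampened : Bool) (out : Int) : Decidable (Spec_countSafeReports reports is_dampened out) := by unfold Spec_countSafeReports; infer_instance

-- ===== CLAIM (what is proved, stated in full; the proofs are below) =====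
def Claim_equal_countSafeReports : Prop := ∀ (reports : List (List Int)) (is_dampened : Bool), Dom_countSafeReports reports is_dampened → Spec_countSafeReports reports is_dampened (countSafeReports reports is_dampened)

-- ===== LEMMAS AND PROOFS =====

-- pair k of report r passes A's per-step checks (same direction as pair 0, gradation 1..3)
def Good (r : List Int) (k : Nat) : Prop :=
  (compareLevels (r.getD k 0) (r.getD (k+1) 0)).1 = (compareLevels (r.getD 0 0) (r.getD 1 0)).1
  ∧ 1 ≤ (compareLevels (r.getD k 0) (r.getD (k+1) 0)).2
  ∧ (compareLevels (r.getD k 0) (r.getD (k+1) 0)).2 ≤ 3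

lemma cl_grad (a b : Int) : (compareLevels a b).2 = |a - b| := rfl

lemma cl_dir_eq_iff (a b c d : Int) :
    ((compareLevels a b).1 = (compareLevels c d).1) ↔
    ((a - b > 0 ∧ c - d > 0) ∨ (a - b < 0 ∧ c - d < 0) ∨ (a - b = 0 ∧ c - d = 0)) := by
  unfold compareLevels
  dsimp only
  split_ifs <;> simp_all <;> omega

lemma crsLoop_spec (r : List Int) (i : Nat) (hi : 1 ≤ i) :
    (crsLoop r (some (compareLevels (r.getD 0 0) (r.getD 1 0)).1) i = (true, none) ∧
      ∀ k, i ≤ k → k + 1 < r.length → Good r k)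
    ∨ (∃ m, i ≤ m ∧ crsLoop r (some (compareLevels (r.getD 0 0) (r.getD 1 0)).1) i = (false, some m) ∧
        m + 1 < r.length ∧ (∀ k, i ≤ k → k < m → Good r k) ∧ ¬ Good r m) := by
  set d0 := (compareLevels (r.getD 0 0) (r.getD 1 0)).1 with hd0
  have main : ∀ (n i : Nat), 1 ≤ i → r.length - i ≤ n →
      (crsLoop r (some d0) i = (true, none) ∧ ∀ k, i ≤ k → k + 1 < r.length → Good r k)
      ∨ (∃ m, i ≤ m ∧ crsLoop r (some d0) i = (false, some m) ∧
          m + 1 < r.length ∧ (∀ k, i ≤ k → k < m → Good r k) ∧ ¬ Good r m) := by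
    intro n
    induction n with
    | zero =>
      intro i hi1 hn
      left
      constructor
      · rw [crsLoop]; simp [show ¬ i + 1 < r.length by omega]
      · intro k hk hkl; omega
    | succ n ih =>
      intro i hi1 hn
      by_cases h : i + 1 < r.length
      · rw [crsLoop]
        simp only [dif_pos h]
        by_cases hdir : d0 ≠ (compareLevels (r.getD i 0) (r.getD (i+1) 0)).1
        · right
          refine ⟨i, le_refl i, by rw [if_pos hdir], h, by omega, ?_⟩
          intro hg
          exact hdir hg.1.symm
        · rw [not_ne_iff] at hdir
          have hne : ¬ d0 ≠ (compareLevels (r.getD i 0) (r.getD (i+1) 0)).1 := fun hx => hx hdir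
          by_cases hgrad : (compareLevels (r.getD i 0) (r.getD (i+1) 0)).2 > 3 ∨
                           (compareLevels (r.getD i 0) (r.getD (i+1) 0)).2 < 1
          · have hb : ((compareLevels (r.getD i 0) (r.getD (i+1) 0)).2 > 3 ||
                       (compareLevels (r.getD i 0) (r.getD (i+1) 0)).2 < 1) = true := by
              simp only [Bool.or_eq_true, decide_eq_true_eq]; exact hgrad
            right
            refine ⟨i, le_refl i, by rw [if_neg hne, if_pos hb], h, by omega, ?_⟩
            intro hg
            obtain ⟨-, hga, hgb⟩ := hg
            rcases hgrad with hg' | hg' <;> omega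
          · have hb : ((compareLevels (r.getD i 0) (r.getD (i+1) 0)).2 > 3 ||
                       (compareLevels (r.getD i 0) (r.getD (i+1) 0)).2 < 1) = false := by
              simp only [Bool.or_eq_false_iff, decide_eq_false_iff_not]; omega
            have hstep : Good r i := by
              refine ⟨hdir.symm, ?_, ?_⟩ <;> omega
            rcases ih (i+1) (by omega) (by omega) with ⟨heq, hall⟩ | ⟨m, hm1, heq, hm2, hpre, hbad⟩
            · left
              refine ⟨by rw [if_neg hne, hb]; simpa using heq, ?_⟩
              intro k hk hkl
              rcases Nat.eq_or_lt_of_le hk with rfl | hk'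
              · exact hstep
              · exact hall k (by omega) hkl
            · right
              refine ⟨m, by omega, by rw [if_neg hne, hb]; simpa using heq, hm2, ?_, hbad⟩
              intro k hk hkm
              rcases Nat.eq_or_lt_of_le hk with rfl | hk'
              · exact hstep
              · exact hpre k (by omega) hkm
      · left
        constructor
        · rw [crsLoop]; simp [h]
        · intro k hk hkl; omega
  exact main (r.length - i) i hi (le_refl _)

lemma checkReportSafety_spec (r : List Int) :
    (checkReportSafety r = (true, none) ∧ ∀ k, k + 1 < r.length → Good r k)
    ∨ (∃ m, checkReportSafety r = (false, some m) ∧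
        m + 1 < r.length ∧ (∀ k, k < m → Good r k) ∧ ¬ Good r m) := by
  unfold checkReportSafety
  rw [crsLoop]
  by_cases h : 0 + 1 < r.length
  · simp only [dif_pos h]
    by_cases hgrad : (compareLevels (r.getD 0 0) (r.getD 1 0)).2 > 3 ∨
                     (compareLevels (r.getD 0 0) (r.getD 1 0)).2 < 1
    · have hb : ((compareLevels (r.getD 0 0) (r.getD 1 0)).2 > 3 ||
                 (compareLevels (r.getD 0 0) (r.getD 1 0)).2 < 1) = true := by
        simp only [Bool.or_eq_true, decide_eq_true_eq]; exact hgrad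
      right
      refine ⟨0, by rw [if_pos hb], h, by omega, ?_⟩
      intro hg
      obtain ⟨-, hga, hgb⟩ := hg
      simp only [Nat.zero_add] at hga hgb
      rcases hgrad with hg' | hg' <;> omega
    · have hb : ((compareLevels (r.getD 0 0) (r.getD 1 0)).2 > 3 ||
                 (compareLevels (r.getD 0 0) (r.getD 1 0)).2 < 1) = false := by
        simp only [Bool.or_eq_false_iff, decide_eq_false_iff_not]; omega
      have hstep : Good r 0 := ⟨rfl, by simp only [Nat.zero_add]; omega, by simp only [Nat.zero_add]; omega⟩
      rcases crsLoop_spec r 1 (le_refl 1) with ⟨heq, hall⟩ | ⟨m, hm1, heq, hm2, hpre, hbad⟩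
      · left
        refine ⟨by rw [hb]; simpa using heq, ?_⟩
        intro k hkl
        rcases Nat.eq_zero_or_pos k with rfl | hk'
        · exact hstep
        · exact hall k (by omega) hkl
      · right
        refine ⟨m, by rw [hb]; simpa using heq, hm2, ?_, hbad⟩
        intro k hkm
        rcases Nat.eq_zero_or_pos k with rfl | hk'
        · exact hstep
        · exact hpre k (by omega) hkm
  · left
    constructor
    · simp [h]
    · intro k hkl; omega

lemma length_diffsOf (r : List Int) : (diffsOf r).length = r.length - 1 := by
  simp [diffsOf]

lemma getElem_diffsOf (r : List Int) (p : Nat) (hp : p + 1 < r.length)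
    (h : p < (diffsOf r).length) :
    (diffsOf r)[p] = r.getD (p+1) 0 - r.getD p 0 := by
  rw [List.getD_eq_getElem r 0 hp, List.getD_eq_getElem r 0 (show p < r.length by omega)]
  simp [diffsOf, List.getElem_zip, List.getElem_tail]

lemma mem_diffsOf (r : List Int) (p : Nat) (hp : p + 1 < r.length) :
    (r.getD (p+1) 0 - r.getD p 0) ∈ diffsOf r := by
  rw [List.mem_iff_getElem]
  refine ⟨p, by rw [length_diffsOf]; omega, ?_⟩
  exact getElem_diffsOf r p hp _

lemma safeReport_iff (r : List Int) :
    safeReport r = true ↔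
      ((∀ x ∈ diffsOf r, 1 ≤ x ∧ x ≤ 3) ∨ (∀ x ∈ diffsOf r, -3 ≤ x ∧ x ≤ -1)) := by
  simp [safeReport, List.all_eq_true, Bool.or_eq_true]

lemma forall_diffsOf_iff (r : List Int) (P : Int → Prop) :
    (∀ x ∈ diffsOf r, P x) ↔ ∀ p, p + 1 < r.length → P (r.getD (p+1) 0 - r.getD p 0) := by
  constructor
  · intro h p hp
    exact h _ (mem_diffsOf r p hp)
  · intro h x hx
    rw [List.mem_iff_getElem] at hx
    obtain ⟨p, hp, rfl⟩ := hx
    have hp' : p + 1 < r.length := by have := length_diffsOf r; omega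
    rw [getElem_diffsOf r p hp']
    exact h p hp'

lemma safeReport_false_of_two (s : List Int) (x1 x2 : Int)
    (h1 : x1 ∈ diffsOf s) (h2 : x2 ∈ diffsOf s)
    (hni : ¬ (1 ≤ x1 ∧ x1 ≤ 3 ∧ 1 ≤ x2 ∧ x2 ≤ 3))
    (hnd : ¬ (-3 ≤ x1 ∧ x1 ≤ -1 ∧ -3 ≤ x2 ∧ x2 ≤ -1)) :
    safeReport s = false := by
  rw [Bool.eq_false_iff]
  intro hs
  rcases (safeReport_iff s).mp hs with h | h
  · exact hni ⟨(h _ h1).1, (h _ h1).2, (h _ h2).1, (h _ h2).2⟩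
  · exact hnd ⟨(h _ h1).1, (h _ h1).2, (h _ h2).1, (h _ h2).2⟩

lemma safeReport_eq_checkReportSafety (r : List Int) :
    safeReport r = (checkReportSafety r).1 := by
  rcases checkReportSafety_spec r with ⟨heq, hall⟩ | ⟨m, heq, hm, hpre, hbad⟩
  · rw [heq]
    show safeReport r = true
    rw [safeReport_iff]
    by_cases hlen : r.length < 2
    · left; rw [forall_diffsOf_iff]; intro p hp; omega
    · have h0 := hall 0 (by omega)
      have hg1 := h0.2.1
      have hg2 := h0.2.2
      rw [cl_grad, Int.abs_eq_natAbs] at hg1 hg2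
      by_cases hsgn : r.getD 0 0 - r.getD 1 0 < 0
      · left
        rw [forall_diffsOf_iff]
        intro p hp
        obtain ⟨hdirp, hp1, hp2⟩ := hall p hp
        rw [cl_grad, Int.abs_eq_natAbs] at hp1 hp2
        have hsp := (cl_dir_eq_iff _ _ _ _).mp hdirp
        omega
      · right
        rw [forall_diffsOf_iff]
        intro p hp
        obtain ⟨hdirp, hp1, hp2⟩ := hall p hp
        rw [cl_grad, Int.abs_eq_natAbs] at hp1 hp2
        have hsp := (cl_dir_eq_iff _ _ _ _).mp hdirp
        omega
  · rw [heq]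
    show safeReport r = false
    by_cases hgrad : 1 ≤ |r.getD m 0 - r.getD (m+1) 0| ∧ |r.getD m 0 - r.getD (m+1) 0| ≤ 3
    · have hdm : (compareLevels (r.getD m 0) (r.getD (m+1) 0)).1
               ≠ (compareLevels (r.getD 0 0) (r.getD 1 0)).1 := by
        intro hc
        exact hbad ⟨hc, by rw [cl_grad]; exact hgrad.1, by rw [cl_grad]; exact hgrad.2⟩
      have hm0 : 1 ≤ m := by
        rcases Nat.eq_zero_or_pos m with rfl | h
        · exact absurd rfl hdm
        · exact h
      obtain ⟨hdir0, h01, h02⟩ := hpre 0 hm0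
      rw [cl_grad, Int.abs_eq_natAbs] at h01 h02
      simp only [Nat.zero_add] at h01 h02
      rw [Int.abs_eq_natAbs] at hgrad
      have hnd : ¬ ((r.getD m 0 - r.getD (m+1) 0 > 0 ∧ r.getD 0 0 - r.getD 1 0 > 0) ∨
                    (r.getD m 0 - r.getD (m+1) 0 < 0 ∧ r.getD 0 0 - r.getD 1 0 < 0) ∨
                    (r.getD m 0 - r.getD (m+1) 0 = 0 ∧ r.getD 0 0 - r.getD 1 0 = 0)) :=
        fun hx => hdm ((cl_dir_eq_iff _ _ _ _).mpr hx)
      exact safeReport_false_of_two r _ _ (mem_diffsOf r 0 (by omega)) (mem_diffsOf r m hm)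
        (by simp only [Nat.zero_add]; omega) (by simp only [Nat.zero_add]; omega)
    · rw [Int.abs_eq_natAbs] at hgrad
      exact safeReport_false_of_two r _ _ (mem_diffsOf r m hm) (mem_diffsOf r m hm)
        (by omega) (by omega)

lemma getD_remove_lt (r : List Int) (j p : Nat) (hp : p < j) (hpl : p < r.length) :
    (r.take j ++ r.drop (j+1)).getD p 0 = r.getD p 0 := by
  have hlen : p < (r.take j ++ r.drop (j+1)).length := by simp; omega
  rw [List.getD_eq_getElem _ 0 hlen, List.getD_eq_getElem r 0 hpl,
      List.getElem_append_left (by simp; omega), List.getElem_take]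

lemma getD_remove_ge (r : List Int) (j p : Nat) (hp : j ≤ p) (hpl : p + 1 < r.length) :
    (r.take j ++ r.drop (j+1)).getD p 0 = r.getD (p+1) 0 := by
  have hjl : j < r.length := by omega
  have hlen : p < (r.take j ++ r.drop (j+1)).length := by simp; omega
  rw [List.getD_eq_getElem _ 0 hlen, List.getD_eq_getElem r 0 hpl,
      List.getElem_append_right (by simp; omega)]
  have : (r.drop (j+1))[p - (r.take j).length]'(by simp; omega)
       = r[(j+1) + (p - (r.take j).length)]'(by simp; omega) := List.getElem_drop ..
  rw [this]
  congr 1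
  simp
  omega

lemma length_remove (r : List Int) (j : Nat) (hj : j < r.length) :
    (r.take j ++ r.drop (j+1)).length = r.length - 1 := by
  simp [List.length_take, List.length_drop]; omega

lemma no_far_fix (r : List Int) (m j : Nat)
    (h1 : m + 1 < r.length) (h2 : ∀ k, k < m → Good r k) (h3 : ¬ Good r m)
    (hj : j + 2 ≤ m ∨ m + 2 ≤ j) (hjl : j < r.length) :
    safeReport (r.take j ++ r.drop (j+1)) = false := by
  set s := r.take j ++ r.drop (j+1) with hsdef
  have hslen : s.length = r.length - 1 := length_remove r j hjl
  have hmem1 : (r.getD (m+1) 0 - r.getD m 0) ∈ diffsOf s := by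
    rcases hj with hjL | hjR
    · have e1 : s.getD (m-1) 0 = r.getD m 0 := by
        have h' := getD_remove_ge r j (m-1) (by omega) (by omega)
        rwa [show m - 1 + 1 = m by omega] at h'
      have e2 : s.getD (m-1+1) 0 = r.getD (m+1) 0 := by
        rw [show m - 1 + 1 = m by omega]
        exact getD_remove_ge r j m (by omega) (by omega)
      have hmm := mem_diffsOf s (m-1) (by omega)
      rwa [e1, e2] at hmm
    · have e1 : s.getD m 0 = r.getD m 0 := getD_remove_lt r j m (by omega) (by omega)
      have e2 : s.getD (m+1) 0 = r.getD (m+1) 0 := getD_remove_lt r j (m+1) (by omega) (by omega)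
      have hmm := mem_diffsOf s m (by omega)
      rwa [e1, e2] at hmm
  by_cases hgrad : 1 ≤ |r.getD m 0 - r.getD (m+1) 0| ∧ |r.getD m 0 - r.getD (m+1) 0| ≤ 3
  · have hdm : (compareLevels (r.getD m 0) (r.getD (m+1) 0)).1
             ≠ (compareLevels (r.getD 0 0) (r.getD 1 0)).1 := by
      intro hc
      exact h3 ⟨hc, by rw [cl_grad]; exact hgrad.1, by rw [cl_grad]; exact hgrad.2⟩
    have hm0 : 1 ≤ m := by
      rcases Nat.eq_zero_or_pos m with rfl | h
      · exact absurd rfl hdm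
      · exact h
    have hk0 : ∃ k0, Good r k0 ∧ (r.getD (k0+1) 0 - r.getD k0 0) ∈ diffsOf s := by
      rcases hj with hjL | hjR
      · refine ⟨m-1, h2 (m-1) (by omega), ?_⟩
        have e1 : s.getD (m-2) 0 = r.getD (m-1) 0 := by
          have h' := getD_remove_ge r j (m-2) (by omega) (by omega)
          rwa [show m - 2 + 1 = m - 1 by omega] at h'
        have e2 : s.getD (m-2+1) 0 = r.getD m 0 := by
          rw [show m - 2 + 1 = m - 1 by omega]
          have h' := getD_remove_ge r j (m-1) (by omega) (by omega)
          rwa [show m - 1 + 1 = m by omega] at h'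
        have hmm := mem_diffsOf s (m-2) (by omega)
        rw [e1, e2] at hmm
        rwa [show m - 1 + 1 = m by omega]
      · refine ⟨0, h2 0 hm0, ?_⟩
        have e1 : s.getD 0 0 = r.getD 0 0 := getD_remove_lt r j 0 (by omega) (by omega)
        have e2 : s.getD 1 0 = r.getD 1 0 := getD_remove_lt r j 1 (by omega) (by omega)
        have hmm := mem_diffsOf s 0 (by omega)
        rwa [e1, e2] at hmm
    obtain ⟨k0, ⟨hdirk, hk1, hk2⟩, hmem2⟩ := hk0
    rw [cl_grad, Int.abs_eq_natAbs] at hk1 hk2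
    rw [Int.abs_eq_natAbs] at hgrad
    have hne : (compareLevels (r.getD m 0) (r.getD (m+1) 0)).1
             ≠ (compareLevels (r.getD k0 0) (r.getD (k0+1) 0)).1 := by
      rw [hdirk]; exact hdm
    have hnd : ¬ ((r.getD m 0 - r.getD (m+1) 0 > 0 ∧ r.getD k0 0 - r.getD (k0+1) 0 > 0) ∨
                  (r.getD m 0 - r.getD (m+1) 0 < 0 ∧ r.getD k0 0 - r.getD (k0+1) 0 < 0) ∨
                  (r.getD m 0 - r.getD (m+1) 0 = 0 ∧ r.getD k0 0 - r.getD (k0+1) 0 = 0)) :=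
      fun hx => hne ((cl_dir_eq_iff _ _ _ _).mpr hx)
    exact safeReport_false_of_two s _ _ hmem2 hmem1 (by omega) (by omega)
  · rw [Int.abs_eq_natAbs] at hgrad
    exact safeReport_false_of_two s _ _ hmem1 hmem1 (by omega) (by omega)

lemma foldl_if_or {α : Type} (p : α → Bool) (l : List α) (a : Bool) :
    l.foldl (fun acc x => if p x then true else acc) a = (a || l.any p) := by
  induction l generalizing a with
  | nil => simp
  | cons x t ih => simp only [List.foldl_cons, List.any_cons, ih]; cases p x <;> simp

lemma dampened_eq (r : List Int) (m : Nat)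
    (hfail : checkReportSafety r = (false, some m)) :
    checkDampenedSafety r m
      = (List.range r.length).any (fun j => safeReport (r.take j ++ r.drop (j+1))) := by
  rcases checkReportSafety_spec r with ⟨heq, _⟩ | ⟨m', heq, hm, hpre, hbad⟩
  · rw [hfail] at heq; simp at heq
  · rw [hfail] at heq
    have hmm : m' = m := by simpa using heq.symm
    rw [hmm] at hm hpre hbad
    have hsf : ∀ l : List Int, (checkReportSafety l).1 = safeReport l :=
      fun l => (safeReport_eq_checkReportSafety l).symm
    simp only [checkDampenedSafety, foldl_if_or, List.any_map, Bool.false_or,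
               hsf, List.eraseIdx_eq_take_drop_succ]
    rw [Bool.eq_iff_iff]
    constructor
    · intro hL
      rw [List.any_eq_true] at hL ⊢
      obtain ⟨j, hjmem, hgj⟩ := hL
      refine ⟨j, ?_, hgj⟩
      rw [List.mem_range]
      by_cases hm0 : 0 < m <;> simp [hm0] at hjmem <;> omega
    · intro hR
      rw [List.any_eq_true] at hR ⊢
      obtain ⟨j, hjmem, hgj⟩ := hR
      rw [List.mem_range] at hjmem
      by_cases hnear : j = m ∨ j = m + 1 ∨ (0 < m ∧ j = m - 1)
      · refine ⟨j, ?_, hgj⟩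
        by_cases hm0 : 0 < m <;> simp [hm0] <;> omega
      · exfalso
        have hfar : j + 2 ≤ m ∨ m + 2 ≤ j := by omega
        have := no_far_fix r m j hm hpre hbad hfar hjmem
        rw [this] at hgj
        exact Bool.false_ne_true hgj

lemma body_eq (is_dampened : Bool) (c : Int) (r : List Int) :
    (let res := checkReportSafety r
     if res.1 then c + 1
     else if is_dampened then
       if checkDampenedSafety r (res.2.getD 0) then c + 1 else c
     else c)
    = (if safeReport r then c + 1
       else if is_dampened && (List.range r.length).any (fun j => safeReport (r.take j ++ r.drop (j+1))) then c + 1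
       else c) := by
  rcases checkReportSafety_spec r with ⟨heq, _⟩ | ⟨m, heq, hm, hpre, hbad⟩
  · have h2 : safeReport r = true := by rw [safeReport_eq_checkReportSafety, heq]
    simp [heq, h2]
  · have h2 : safeReport r = false := by rw [safeReport_eq_checkReportSafety, heq]
    cases is_dampened with
    | false => simp [heq, h2]
    | true => simp [heq, h2, dampened_eq r m heq]

lemma foldl_body_eq (is_dampened : Bool) (l : List (List Int)) : ∀ c : Int,
    (l.foldl (fun count report =>
       let res := checkReportSafety report
       if res.1 then count + 1
       else if is_dampened then
         if checkDampenedSafety report (res.2.getD 0) then count + 1 else count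
       else count) c)
    = l.foldl (fun count r =>
        if safeReport r then count + 1
        else if is_dampened && (List.range r.length).any (fun j => safeReport (r.take j ++ r.drop (j+1))) then count + 1
        else count) c := by
  induction l with
  | nil => intro c; rfl
  | cons r t ih =>
    intro c
    simp only [List.foldl_cons]
    rw [body_eq is_dampened c r]
    exact ih _

-- ===== VERDICT (by name: the statement is the Claim_ definition above) =====
theorem countSafeReports_spec : Claim_equal_countSafeReports := by
  intro reports is_dampened _
  unfold Spec_countSafeReports countSafeReports countSafeReports_alt
  exact foldl_body_eq is_dampened reports 0
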